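-- pv_equiv track=rewrite | github.com/Sugarc0de/2025_pig_coding | pig_eat_dessert.py | pig_eats
-- ===== SOURCE A (Python) =====
-- def pig_eats(xs, T):
--     xs = list(sorted(xs))
--     ans = 0
--     for i in range(len(xs)):
--         xi = xs[i]
--         # We want, at the end of binary search:
--         # xs[lo] < T - xi
--         # xs[hi] >= T - xi
--         lo = i
--         hi = len(xs)
--         while hi - lo > 1:
--             mid = (hi + lo) // 2
--             if xs[mid] < T - xi:
--                 lo = mid
--             else:
--                 hi = mid
--         ans += len(xs) - hi
--     return ans
-- ===== SOURCE B (Python) =====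
-- def pig_eats(xs, T):
--     ys = sorted(xs)
--     l, r = 0, len(ys) - 1
--     ans = 0
--     while l < r:
--         if ys[r] >= T - ys[l]:
--             ans += r - l
--             r -= 1
--         else:
--             l += 1
--     return ans
-- ===== Notes on version B (the rewrite author's own statement) =====
-- stated objective: faster
-- what changed: Replaces the per-element binary search (n searches over the sorted list) with a single two-pointer sweep over the sorted list that counts all r-l partners at once.
import Mathlib
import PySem

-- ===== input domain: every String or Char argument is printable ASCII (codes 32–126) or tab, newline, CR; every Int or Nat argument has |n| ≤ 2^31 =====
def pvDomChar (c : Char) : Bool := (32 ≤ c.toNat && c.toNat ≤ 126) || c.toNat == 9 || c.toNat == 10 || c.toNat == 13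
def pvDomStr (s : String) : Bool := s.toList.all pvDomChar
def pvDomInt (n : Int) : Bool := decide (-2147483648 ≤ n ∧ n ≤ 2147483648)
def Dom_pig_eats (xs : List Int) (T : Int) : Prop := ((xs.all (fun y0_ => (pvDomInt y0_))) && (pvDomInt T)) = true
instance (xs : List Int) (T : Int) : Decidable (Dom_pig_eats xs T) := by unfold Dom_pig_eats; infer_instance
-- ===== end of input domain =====

-- B replaces A's n binary searches over the sorted list with one linear two-pointer sweep (return value only; neither mutates its argument).

-- ===== PORT A =====
-- the inner 'while hi - lo > 1' binary search; indices are always in range, so xs[mid] is ys.getD mid 0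
def pigBS (ys : List Int) (t : Int) (lo hi : Nat) : Nat :=
  if _h : 1 < hi - lo then
    let mid := (hi + lo) / 2
    if ys.getD mid 0 < t then pigBS ys t mid hi else pigBS ys t lo mid
  else hi
termination_by hi - lo
decreasing_by all_goals omega

def pig_eats (xs : List Int) (T : Int) : Int :=
  let ys := PySem.List.sorted xs (fun x => x) false
  let n := ys.length
  (List.range n).foldl (fun ans i =>
    let xi := ys.getD i 0
    let hi := pigBS ys (T - xi) i n
    ans + ((n : Int) - (hi : Int))) 0

-- ===== PORT B =====
-- the two-pointer 'while l < r' loop; l, r always in range when read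
def pigTP (ys : List Int) (T : Int) (l r : Nat) (ans : Int) : Int :=
  if _h : l < r then
    if T - ys.getD l 0 ≤ ys.getD r 0 then pigTP ys T l (r - 1) (ans + ((r : Int) - (l : Int)))
    else pigTP ys T (l + 1) r ans
  else ans
termination_by r - l
decreasing_by all_goals omega

def pig_eats_alt (xs : List Int) (T : Int) : Int :=
  let ys := PySem.List.sorted xs (fun x => x) false
  pigTP ys T 0 (ys.length - 1) 0

-- ===== PRECONDITION & SPEC =====
def Spec_pig_eats (xs : List Int) (T : Int) (out : Int) : Prop := out = pig_eats_alt xs T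
instance (xs : List Int) (T : Int) (out : Int) : Decidable (Spec_pig_eats xs T out) := by unfold Spec_pig_eats; infer_instance

-- ===== CLAIM (what is proved, stated in full; the proofs are below) =====
def Claim_equal_pig_eats : Prop := ∀ (xs : List Int) (T : Int), Dom_pig_eats xs T → Spec_pig_eats xs T (pig_eats xs T)

-- ===== LEMMAS AND PROOFS =====

lemma getD_mono (ys : List Int) (hp : ys.Pairwise (· ≤ ·)) {i j : Nat} (hij : i ≤ j)
    (hj : j < ys.length) : ys.getD i 0 ≤ ys.getD j 0 := by
  rcases Nat.eq_or_lt_of_le hij with rfl | h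
  · exact le_refl _
  · have hi : i < ys.length := lt_trans h hj
    rw [List.getD_eq_getElem ys 0 hi, List.getD_eq_getElem ys 0 hj]
    exact List.pairwise_iff_getElem.mp hp i j hi hj h

-- number of pairs l ≤ i < j ≤ r of positions in sorted ys with ys[j] ≥ T - ys[i]
def pigCnt (ys : List Int) (T : Int) (l r : Nat) : Nat :=
  ∑ i ∈ Finset.Ico l r,
    ((Finset.Ico (i+1) (r+1)).filter (fun j => T - ys.getD i 0 ≤ ys.getD j 0)).card

lemma pigCnt_stop {ys : List Int} {T : Int} {l r : Nat} (h : r ≤ l) : pigCnt ys T l r = 0 := by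
  simp [pigCnt, Finset.Ico_eq_empty (by omega : ¬ l < r)]

lemma pigCnt_true {ys : List Int} {T : Int} {l r : Nat} (hp : ys.Pairwise (· ≤ ·))
    (hlr : l < r) (hr : r < ys.length) (hc : T - ys.getD l 0 ≤ ys.getD r 0) :
    pigCnt ys T l r = (r - l) + pigCnt ys T l (r - 1) := by
  have step : ∀ i ∈ Finset.Ico l r,
      ((Finset.Ico (i+1) (r+1)).filter (fun j => T - ys.getD i 0 ≤ ys.getD j 0)).card
      = ((Finset.Ico (i+1) r).filter (fun j => T - ys.getD i 0 ≤ ys.getD j 0)).card + 1 := by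
    intro i hi
    rw [Finset.mem_Ico] at hi
    have hPr : T - ys.getD i 0 ≤ ys.getD r 0 :=
      le_trans (by have := getD_mono ys hp hi.1 (lt_trans hi.2 hr); omega) hc
    have : Finset.Ico (i+1) (r+1) = insert r (Finset.Ico (i+1) r) := by
      ext x; simp only [Finset.mem_Ico, Finset.mem_insert]; omega
    rw [this, Finset.filter_insert, if_pos hPr,
      Finset.card_insert_of_notMem (by simp [Finset.mem_Ico])]
  rw [pigCnt, Finset.sum_congr rfl step, Finset.sum_add_distrib]
  have hrsub : r - 1 + 1 = r := by omega
  have htop : ∑ i ∈ Finset.Ico l r,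
      ((Finset.Ico (i+1) r).filter (fun j => T - ys.getD i 0 ≤ ys.getD j 0)).card
      = pigCnt ys T l (r-1) := by
    rw [pigCnt]
    conv_lhs => rw [← hrsub]
    rw [Finset.sum_Ico_succ_top (by omega)]
    simp [hrsub]
  rw [htop]
  simp [Nat.card_Ico]
  omega

lemma pigCnt_false {ys : List Int} {T : Int} {l r : Nat} (hp : ys.Pairwise (· ≤ ·))
    (hlr : l < r) (hr : r < ys.length) (hc : ¬ T - ys.getD l 0 ≤ ys.getD r 0) :
    pigCnt ys T l r = pigCnt ys T (l + 1) r := by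
  rw [pigCnt, Finset.sum_eq_sum_Ico_succ_bot hlr]
  have : ((Finset.Ico (l+1) (r+1)).filter (fun j => T - ys.getD l 0 ≤ ys.getD j 0)) = ∅ := by
    rw [Finset.filter_eq_empty_iff]
    intro j hj
    rw [Finset.mem_Ico] at hj
    have := getD_mono ys hp (by omega : j ≤ r) hr
    omega
  rw [this]
  simp [pigCnt]

lemma pigTP_eq (ys : List Int) (T : Int) (hp : ys.Pairwise (· ≤ ·)) :
    ∀ k l r ans, r - l ≤ k → r < ys.length →
      pigTP ys T l r ans = ans + (pigCnt ys T l r : Int) := by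
  intro k
  induction k with
  | zero =>
    intro l r ans hk hr
    rw [pigTP, dif_neg (by omega), pigCnt_stop (by omega)]
    simp
  | succ k ih =>
    intro l r ans hk hr
    by_cases hlr : l < r
    · rw [pigTP, dif_pos hlr]
      by_cases hc : T - ys.getD l 0 ≤ ys.getD r 0
      · rw [if_pos hc, ih l (r-1) _ (by omega) (by omega),
          pigCnt_true hp hlr hr hc]
        push_cast
        omega
      · rw [if_neg hc, ih (l+1) r _ (by omega) hr, pigCnt_false hp hlr hr hc]
    · rw [pigTP, dif_neg hlr, pigCnt_stop (by omega)]
      simp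

lemma pigBS_bounds (ys : List Int) (t : Int) :
    ∀ k lo hi, hi - lo ≤ k → lo < hi → lo < pigBS ys t lo hi ∧ pigBS ys t lo hi ≤ hi := by
  intro k
  induction k with
  | zero => intro lo hi hk hlh; omega
  | succ k ih =>
    intro lo hi hk hlh
    rw [pigBS]
    by_cases h : 1 < hi - lo
    · rw [dif_pos h]
      by_cases hc : ys.getD ((hi + lo) / 2) 0 < t
      · rw [if_pos hc]
        have := ih ((hi + lo) / 2) hi (by omega) (by omega)
        omega
      · rw [if_neg hc]
        have := ih lo ((hi + lo) / 2) (by omega) (by omega)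
        omega
    · rw [dif_neg h]; omega

lemma pigBS_spec (ys : List Int) (t : Int) (hp : ys.Pairwise (· ≤ ·)) (i : Nat) :
    ∀ k lo hi, hi - lo ≤ k → i ≤ lo → lo < hi → hi ≤ ys.length →
      (∀ j, hi ≤ j → j < ys.length → t ≤ ys.getD j 0) →
      (∀ j, i < j → j ≤ lo → ys.getD j 0 < t) →
      ∀ j, i < j → j < ys.length → (t ≤ ys.getD j 0 ↔ pigBS ys t lo hi ≤ j) := by
  intro k
  induction k with
  | zero => intro lo hi hk hil hlh; omega
  | succ k ih =>
    intro lo hi hk hil hlh hhn hhi hlo j hij hjn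
    rw [pigBS]
    by_cases h : 1 < hi - lo
    · rw [dif_pos h]
      by_cases hc : ys.getD ((hi + lo) / 2) 0 < t
      · rw [if_pos hc]
        exact ih ((hi + lo) / 2) hi (by omega) (by omega) (by omega) hhn hhi
          (fun j' hj1 hj2 =>
            lt_of_le_of_lt (getD_mono ys hp hj2 (by omega)) hc) j hij hjn
      · rw [if_neg hc]
        exact ih lo ((hi + lo) / 2) (by omega) hil (by omega) (by omega)
          (fun j' hj1 hj2 =>
            le_trans (by omega) (getD_mono ys hp hj1 hj2)) hlo j hij hjn
    · rw [dif_neg h]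
      have hhi1 : hi = lo + 1 := by omega
      by_cases hj : hi ≤ j
      · exact iff_of_true (hhi j hj hjn) hj
      · have h1 : j ≤ lo := by omega
        have h2 := hlo j hij h1
        constructor
        · intro h3; omega
        · intro h3; omega

lemma pigA_term (ys : List Int) (T : Int) (hp : ys.Pairwise (· ≤ ·)) {i : Nat}
    (hi : i < ys.length) :
    (ys.length : Int) - (pigBS ys (T - ys.getD i 0) i ys.length : Int)
      = (((Finset.Ico (i+1) ys.length).filter
          (fun j => T - ys.getD i 0 ≤ ys.getD j 0)).card : Int) := by
  set t := T - ys.getD i 0 with ht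
  set h := pigBS ys t i ys.length with hdef
  have hb := pigBS_bounds ys t (ys.length - i) i ys.length (by omega) hi
  have hiff := pigBS_spec ys t hp i (ys.length - i) i ys.length (by omega) (le_refl i) hi
    (le_refl _) (fun j h1 h2 => by omega) (fun j h1 h2 => by omega)
  have hset : (Finset.Ico (i+1) ys.length).filter (fun j => t ≤ ys.getD j 0)
      = Finset.Ico h ys.length := by
    ext j
    simp only [Finset.mem_filter, Finset.mem_Ico]
    constructor
    · rintro ⟨⟨h1, h2⟩, h3⟩
      exact ⟨(hiff j (by omega) h2).mp h3, h2⟩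
    · rintro ⟨h1, h2⟩
      exact ⟨⟨by omega, h2⟩, (hiff j (by omega) h2).mpr h1⟩
  rw [hset, Nat.card_Ico]
  omega

lemma sum_map_range_int (g : Nat → Int) (n : Nat) :
    ((List.range n).map g).sum = ∑ i ∈ Finset.range n, g i := by
  induction n with
  | zero => simp
  | succ n ih => simp [List.range_succ, Finset.sum_range_succ, ih]

-- ===== VERDICT (by name: the statement is the Claim_ definition above) =====
theorem pig_eats_spec : Claim_equal_pig_eats := by
  intro xs T _
  show pig_eats xs T = pig_eats_alt xs T
  rw [pig_eats, pig_eats_alt]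
  set ys := PySem.List.sorted xs (fun x => x) false with hys
  have hp : ys.Pairwise (· ≤ ·) := PySem.List.sorted_pairwise xs (fun x => x)
  set n := ys.length with hn
  rcases Nat.eq_zero_or_pos n with h0 | hpos
  · rw [h0]
    rw [pigTP]
    simp
  · rw [PySem.List.foldl_add, pigTP_eq ys T hp (n - 1) 0 (n - 1) 0 (by omega) (by omega)]
    simp only [zero_add]
    rw [sum_map_range_int]
    have hterm : ∀ i ∈ Finset.range n,
        (fun i => (n : Int) - (pigBS ys (T - ys.getD i 0) i n : Int)) i
        = (fun i => (((Finset.Ico (i+1) n).filter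
            (fun j => T - ys.getD i 0 ≤ ys.getD j 0)).card : Int)) i := by
      intro i hi
      rw [Finset.mem_range] at hi
      exact pigA_term ys T hp hi
    rw [Finset.sum_congr rfl hterm]
    rw [← Nat.cast_sum]
    congr 1
    rw [pigCnt]
    have hr : n - 1 + 1 = n := by omega
    conv_lhs => rw [show Finset.range n = Finset.Ico 0 n by simp, ← hr]
    rw [Finset.sum_Ico_succ_top (by omega)]
    simp [hr]
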